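-- pv_equiv track=rewrite | github.com/code-cp/leetcode | solutions/1156/main.py | maxRepOpt1
-- ===== SOURCE A (Python) =====
-- from collections import Counter
--
-- def maxRepOpt1(text: str) -> int:
--     cnt = Counter(text)
--     n = len(text)
--
--     skipped = 0
--     cur_letter = text[0]
--     cur_cnt = 1
--
--     max_cnt = 0
--     i = 1
--     j = 0
--
--     while i < n:
--         t = text[i]
--         if t == cur_letter:
--             cur_cnt += 1
--         elif skipped == 0:
--             skipped += 1
--             j = i
--         else:
--             if cnt[cur_letter] > cur_cnt:
--                 cur_cnt += 1
--             if cur_cnt > max_cnt: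
--                 max_cnt = cur_cnt
--
--             # 从上一次断掉的地方重新开始计数
--             if j > 0:
--                 i = j
--             cur_letter = text[i]
--             skipped = 0
--             cur_cnt = 1
--         i += 1
--
--     # 如果skipped==1，那就替换中间的字母
--     # 如果skipped==0，就替换之前的或者之后的一个字母
--     if cnt[cur_letter] > cur_cnt:
--         cur_cnt += 1
--     if cur_cnt > max_cnt:
--         max_cnt = cur_cnt
--
--     return max_cnt
-- ===== SOURCE B (Python) =====
-- from collections import Counter
--
--
-- def maxRepOpt1(text: str) -> int:
--     # Run-length compression + two passes over the runs.
--     # (A raises IndexError on "", excluded by Pre_; B returns 0 there.)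
--     if not text:
--         return 0
--     cnt = Counter(text)
--     runs = []
--     i = 0
--     n = len(text)
--     while i < n:
--         j = i
--         while j < n and text[j] == text[i]:
--             j += 1
--         runs.append((text[i], j - i))
--         i = j
--     best = 0
--     # every run, extended by one borrowed occurrence if available
--     for ch, ln in runs:
--         best = max(best, min(ln + 1, cnt[ch]))
--     # two runs of the same char separated by a single different char
--     for (c1, l1), (c2, l2), (c3, l3) in zip(runs, runs[1:], runs[2:]):
--         if l2 == 1 and c3 == c1:
--             best = max(best, min(l1 + l3 + 1, cnt[c1]))
--     return best
-- ===== Notes on version B (the rewrite author's own statement) =====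
-- stated objective: alternative
-- what changed: A's single backtracking scan (which rewinds the index to the last skipped position and re-counts) is replaced by run-length compressing the string once and making two simple passes over the runs: each run extended by one borrowed occurrence, and each pair of same-char runs separated by a single character merged, all capped by the character's total count.
import Mathlib
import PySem

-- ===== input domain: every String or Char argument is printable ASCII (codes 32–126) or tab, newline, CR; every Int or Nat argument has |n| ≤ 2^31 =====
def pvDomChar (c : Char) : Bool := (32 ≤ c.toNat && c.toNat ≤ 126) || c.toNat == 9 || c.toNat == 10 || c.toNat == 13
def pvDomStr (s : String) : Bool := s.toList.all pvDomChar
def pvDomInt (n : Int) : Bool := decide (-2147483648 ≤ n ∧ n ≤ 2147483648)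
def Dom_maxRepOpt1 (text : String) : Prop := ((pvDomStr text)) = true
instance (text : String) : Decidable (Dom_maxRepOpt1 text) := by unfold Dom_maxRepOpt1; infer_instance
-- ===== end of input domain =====

-- B re-implements A by run-length compression + two passes over the runs (alternative
-- decomposition, same results); A raises IndexError on "" (excluded by Pre_), B returns 0 there.

-- ===== PORT A =====
-- Counter lookup cnt[c]: number of occurrences of c in text (0 when absent) — exact.
def pvCnt (t : List Char) (c : Char) : Int := (t.count c : Int)

-- the pair of trailing statements 'if cnt[cur_letter] > cur_cnt: cur_cnt += 1' ;
-- 'if cur_cnt > max_cnt: max_cnt = cur_cnt' (appears twice in A verbatim)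
def pvFinal (cnt : Char → Int) (curL : Char) (curC maxC : Int) : Int :=
  let curC' := if cnt curL > curC then curC + 1 else curC
  if curC' > maxC then curC' else maxC

-- A's while loop, step for step; i and j are the Python indices (always ≥ 0, j < i is
-- an invariant A maintains, carried as `hji` for termination);
-- t.getD i ' ' is exact for text[i] because every access happens with i < len(text).
def loopA (t : List Char) (cnt : Char → Int) (i j skipped : Nat) (curL : Char)
    (curC maxC : Int) (hji : j < i) : Int :=
  if h : i < t.length then
    let ch := t.getD i ' '
    if ch = curL then
      loopA t cnt (i+1) j skipped curL (curC+1) maxC (Nat.lt_succ_of_lt hji)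
    else if skipped = 0 then
      loopA t cnt (i+1) i 1 curL curC maxC (Nat.lt_succ_self i)
    else
      let maxC' := pvFinal cnt curL curC maxC
      if h0 : 0 < j then
        loopA t cnt (j+1) j 0 (t.getD j ' ') 1 maxC' (Nat.lt_succ_self j)
      else
        loopA t cnt (i+1) j 0 (t.getD i ' ') 1 maxC' (Nat.lt_succ_of_lt hji)
  else
    pvFinal cnt curL curC maxC
termination_by (t.length - j, skipped, t.length - i)
decreasing_by
  · exact Prod.Lex.right _ (Prod.Lex.right _ (by omega))
  · exact Prod.Lex.left _ _ (by omega)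
  · exact Prod.Lex.right _ (by exact Prod.Lex.left _ _ (by omega))
  · exact Prod.Lex.right _ (by exact Prod.Lex.left _ _ (by omega))

def maxRepOpt1 (text : String) : Int :=
  let t := text.toList
  let cnt := pvCnt t
  match PySem.List.pyGet? t 0 with      -- text[0]; none = IndexError on ""
  | none => 0
  | some c => loopA t cnt 1 0 0 c 1 0 Nat.one_pos

-- ===== PORT B =====
-- run-length compression: one (char, length) pair per maximal block (B's nested while loop;
-- the inner while that advances j is the takeWhile/dropWhile split of the tail)
def runsOf (t : List Char) : List (Char × Int) :=
  match t with
  | [] => []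
  | c :: rest =>
      (c, ((rest.takeWhile (· == c)).length : Int) + 1) :: runsOf (rest.dropWhile (· == c))
termination_by t.length
decreasing_by simp [Nat.lt_succ_of_le, List.length_dropWhile_le]

-- B's first for-loop
def pass1 (cnt : Char → Int) : List (Char × Int) → Int → Int
  | [], best => best
  | (c, l) :: rs, best => pass1 cnt rs (max best (min (l + 1) (cnt c)))

-- B's second for-loop (over adjacent triples of runs)
def pass2 (cnt : Char → Int) : List (Char × Int) → Int → Int
  | (c1, l1) :: (c2, l2) :: (c3, l3) :: rs, best =>
      pass2 cnt ((c2, l2) :: (c3, l3) :: rs)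
        (if l2 = 1 ∧ c3 = c1 then max best (min (l1 + l3 + 1) (cnt c1)) else best)
  | _, best => best

def maxRepOpt1_alt (text : String) : Int :=
  let t := text.toList
  if t = [] then 0
  else
    let cnt := pvCnt t
    let runs := runsOf t
    pass2 cnt runs (pass1 cnt runs 0)

-- ===== PRECONDITION & SPEC =====
-- Pre_ excludes only the empty string, on which A raises IndexError at text[0].
def Pre_maxRepOpt1 (text : String) : Prop := text ≠ ""
instance (text : String) : Decidable (Pre_maxRepOpt1 text) := by unfold Pre_maxRepOpt1; infer_instance
def pvWitness_maxRepOpt1 : String := "aabca"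

def Spec_maxRepOpt1 (text : String) (out : Int) : Prop := out = maxRepOpt1_alt text
instance (text : String) (out : Int) : Decidable (Spec_maxRepOpt1 text out) := by unfold Spec_maxRepOpt1; infer_instance

-- ===== CLAIM (what is proved, stated in full; the proofs are below) =====
def Claim_equal_maxRepOpt1 : Prop := ∀ (text : String), Dom_maxRepOpt1 text → Pre_maxRepOpt1 text → Spec_maxRepOpt1 text (maxRepOpt1 text)

-- ===== LEMMAS AND PROOFS =====

theorem loopA_consume (t : List Char) (cnt : Char → Int) (c : Char)
    (m : Nat) : ∀ (i j skipped : Nat) (curC maxC : Int) (hji : j < i),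
      i + m ≤ t.length → (∀ k, k < m → t.getD (i + k) ' ' = c) →
      loopA t cnt i j skipped c curC maxC hji
        = loopA t cnt (i + m) j skipped c (curC + (m : Int)) maxC
            (Nat.lt_of_lt_of_le hji (Nat.le_add_right i m)) := by
  induction m with
  | zero => intro i j s curC maxC hji _ _; simp
  | succ m ih =>
    intro i j s curC maxC hji hle hc
    rw [loopA]
    have hi : i < t.length := by omega
    have h0 : t.getD i ' ' = c := by simpa using hc 0 (by omega)
    simp only [hi, dif_pos, h0, if_pos]
    have := ih (i+1) j s (curC+1) maxC (Nat.lt_succ_of_lt hji) (by omega)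
      (fun k hk => by have := hc (k+1) (by omega); simpa [Nat.add_assoc, Nat.add_comm 1 k] using this)
    rw [this]
    congr 1 <;> (push_cast; ring)
-- the sequence of windows A's loop scans, read off the run list
def wins (cnt : Char → Int) : List (Char × Int) → Int → Int
  | [], acc => acc
  | [(c, a)], acc => pvFinal cnt c a acc
  | [(c, a), (d, b)], acc =>
      if b = 1 then pvFinal cnt c a acc
      else wins cnt [(d, b)] (pvFinal cnt c a acc)
  | (c, a) :: (d, b) :: (c2, e) :: rest, acc =>
      if b = 1 ∧ c2 = c then
        if rest = [] then pvFinal cnt c (a + e) acc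
        else wins cnt ((d, b) :: (c2, e) :: rest) (pvFinal cnt c (a + e) acc)
      else wins cnt ((d, b) :: (c2, e) :: rest) (pvFinal cnt c a acc)
def sumLen (e : Char) : List (Char × Int) → Int
  | [] => 0
  | (c, l) :: rs => (if c = e then l else 0) + sumLen e rs
theorem wins_one (cnt : Char → Int) (c : Char) (a acc : Int) :
    wins cnt [(c, a)] acc = pvFinal cnt c a acc := rfl

theorem wins_two_skip (cnt : Char → Int) (c d : Char) (a b acc : Int) (hb : b = 1) :
    wins cnt [(c, a), (d, b)] acc = pvFinal cnt c a acc := by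
  rw [wins, if_pos hb]

theorem wins_two_go (cnt : Char → Int) (c d : Char) (a b acc : Int) (hb : b ≠ 1) :
    wins cnt [(c, a), (d, b)] acc = pvFinal cnt d b (pvFinal cnt c a acc) := by
  rw [wins, if_neg hb, wins_one]

theorem wins_merge_end (cnt : Char → Int) (c d c2 : Char) (a b e acc : Int)
    (hb : b = 1) (hc : c2 = c) :
    wins cnt [(c, a), (d, b), (c2, e)] acc = pvFinal cnt c (a + e) acc := by
  rw [wins, if_pos ⟨hb, hc⟩, if_pos rfl]

theorem wins_merge_go (cnt : Char → Int) (c d c2 : Char) (a b e : Int)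
    (rest : List (Char × Int)) (acc : Int) (hb : b = 1) (hc : c2 = c) (hr : rest ≠ []) :
    wins cnt ((c, a) :: (d, b) :: (c2, e) :: rest) acc
      = wins cnt ((d, b) :: (c2, e) :: rest) (pvFinal cnt c (a + e) acc) := by
  rw [wins, if_pos ⟨hb, hc⟩, if_neg hr]

theorem wins_nomerge (cnt : Char → Int) (c d c2 : Char) (a b e : Int)
    (rest : List (Char × Int)) (acc : Int) (h : ¬ (b = 1 ∧ c2 = c)) :
    wins cnt ((c, a) :: (d, b) :: (c2, e) :: rest) acc
      = wins cnt ((d, b) :: (c2, e) :: rest) (pvFinal cnt c a acc) := by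
  rw [wins, if_neg h]

theorem pass1_cons (cnt : Char → Int) (c : Char) (l : Int) (rs : List (Char × Int)) (b : Int) :
    pass1 cnt ((c, l) :: rs) b = pass1 cnt rs (max b (min (l + 1) (cnt c))) := rfl

theorem pass2_two (cnt : Char → Int) (rs : List (Char × Int)) (b : Int) (h : rs.length ≤ 2) :
    pass2 cnt rs b = b := by
  match rs with
  | [] => rfl
  | [r] => rfl
  | [r1, r2] => rfl
  | r1 :: r2 :: r3 :: rs' => simp at h

theorem pass2_cons (cnt : Char → Int) (c1 c2 c3 : Char) (l1 l2 l3 : Int)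
    (rs : List (Char × Int)) (b : Int) :
    pass2 cnt ((c1, l1) :: (c2, l2) :: (c3, l3) :: rs) b
      = pass2 cnt ((c2, l2) :: (c3, l3) :: rs)
          (if l2 = 1 ∧ c3 = c1 then max b (min (l1 + l3 + 1) (cnt c1)) else b) := rfl

theorem pvFinal_eq (cnt : Char → Int) (c : Char) (a acc : Int) (h : a ≤ cnt c) :
    pvFinal cnt c a acc = max acc (min (a + 1) (cnt c)) := by
  simp only [pvFinal, max_def, min_def]
  split_ifs <;> omega

theorem pass1_max (cnt : Char → Int) :
    ∀ (rs : List (Char × Int)) (b m : Int), pass1 cnt rs (max b m) = max (pass1 cnt rs b) m := by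
  intro rs
  induction rs with
  | nil => intro b m; rfl
  | cons r rs ih =>
    intro b m
    obtain ⟨c, l⟩ := r
    simp only [pass1]
    rw [max_right_comm, ih]

theorem sumLen_nonneg (e : Char) :
    ∀ (rs : List (Char × Int)), (∀ r ∈ rs, 1 ≤ r.2) → 0 ≤ sumLen e rs := by
  intro rs
  induction rs with
  | nil => intro _; simp [sumLen]
  | cons r rs ih =>
    intro h
    obtain ⟨c, l⟩ := r
    have h1 : (1:Int) ≤ l := h (c, l) (by simp)
    have h2 := ih (fun r hr => h r (by simp [hr]))
    simp only [sumLen]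
    split_ifs <;> omega

theorem wins_eq_pass (cnt : Char → Int) :
    ∀ (rs : List (Char × Int)) (acc : Int),
      (∀ r ∈ rs, 1 ≤ r.2) →
      (∀ e, sumLen e rs ≤ cnt e) →
      (∀ e, sumLen e rs < cnt e → min 2 (cnt e) ≤ acc) →
      wins cnt rs acc = pass2 cnt rs (pass1 cnt rs acc) := by
  intro rs
  induction rs with
  | nil => intro acc _ _ _; rfl
  | cons r tl ih =>
    intro acc hlen hcnt hacc
    obtain ⟨c, a⟩ := r
    have ha1 : (1:Int) ≤ a := hlen (c, a) (by simp)
    have htl_len : ∀ r ∈ tl, (1:Int) ≤ r.2 := fun r hr => hlen r (by simp [hr])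
    have htl_nn : ∀ e, 0 ≤ sumLen e tl := fun e => sumLen_nonneg e tl htl_len
    have hsum : ∀ e, sumLen e ((c, a) :: tl) = (if c = e then a else 0) + sumLen e tl := by
      intro e; rfl
    have htl_cnt : ∀ e, sumLen e tl ≤ cnt e := by
      intro e; have := hcnt e; rw [hsum] at this; split_ifs at this <;> omega
    have hac : a ≤ cnt c := by
      have := hcnt c; rw [hsum] at this; simp at this; have := htl_nn c; omega
    match tl, htl_len, htl_cnt, htl_nn, ih with
    | [], _, _, _, _ =>
      rw [wins_one, pvFinal_eq cnt c a acc hac, pass1_cons, pass2_two _ _ _ (by simp)]; rfl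
    | [(d, b)], htl_len, htl_cnt, htl_nn, _ =>
      have hbd : b ≤ cnt d := by
        have := htl_cnt d; simp [sumLen] at this; omega
      rw [pass1_cons, pass1_cons, pass2_two _ _ _ (by simp)]
      by_cases hb : b = 1
      · -- A's scan ends inside the skipped final 1-run; that run's candidate is dominated
        rw [wins_two_skip _ _ _ _ _ _ hb, pvFinal_eq cnt c a acc hac]
        subst hb
        have habs : min (1 + 1) (cnt d) ≤ max acc (min (a + 1) (cnt c)) := by
          by_cases hlt : sumLen d [(c,a),(d,1)] < cnt d
          · have := hacc d hlt; omega
          · have h1 := hcnt d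
            simp only [sumLen] at hlt h1
            by_cases hcd : c = d
            · subst hcd; simp only [if_pos rfl] at hlt h1; omega
            · simp only [if_neg hcd] at hlt h1; omega
        simp [pass1]
        omega
      · rw [wins_two_go _ _ _ _ _ _ hb, pvFinal_eq cnt c a acc hac,
          pvFinal_eq cnt d b _ hbd]
        rfl
    | (d, b) :: (c2, e) :: rest, htl_len, htl_cnt, htl_nn, ih =>
      have hb1 : (1:Int) ≤ b := htl_len (d, b) (by simp)
      have he1 : (1:Int) ≤ e := htl_len (c2, e) (by simp)
      have hrest_nn : 0 ≤ sumLen c rest :=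
        sumLen_nonneg c rest (fun r hr => htl_len r (by simp [hr]))
      rw [pass1_cons, pass2_cons]
      by_cases hcond : b = 1 ∧ c2 = c
      · obtain ⟨hb, hc2⟩ := hcond
        have hace : a + e ≤ cnt c := by
          have h1 := hcnt c
          simp only [sumLen, hc2, if_pos rfl] at h1
          have h2 : 0 ≤ sumLen c rest := hrest_nn
          split_ifs at h1 <;> omega
        have hm1M : min (a + 1) (cnt c) ≤ min (a + e + 1) (cnt c) := by omega
        have hM2 : (2:Int) ≤ min (a + e + 1) (cnt c) := by omega
        rw [if_pos ⟨hb, hc2⟩]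
        have hacc' : ∀ e', sumLen e' ((d, b) :: (c2, e) :: rest) < cnt e' →
            min 2 (cnt e') ≤ max acc (min (a + e + 1) (cnt c)) := by
          intro e' hlt
          by_cases hce : c = e'
          · subst hce; omega
          · have h2 := hacc e'
            rw [hsum e'] at h2
            simp only [hce, if_false] at h2
            have := htl_nn e'
            exact le_trans (h2 (by omega)) (le_max_left _ _)
        cases rest with
        | nil =>
          have hm32 : min (e + 1) (cnt c2) ≤ min (a + e + 1) (cnt c) := by rw [hc2]; omega
          have hm22 : min (1 + 1) (cnt d) ≤ min (a + e + 1) (cnt c) := by omega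
          rw [wins_merge_end _ _ _ _ _ _ _ _ hb hc2, pvFinal_eq cnt c (a + e) acc hace,
            pass1_cons, pass1_cons, pass2_two _ _ _ (by simp)]
          simp only [pass1, hc2]
          omega
        | cons r4 rest' =>
          rw [wins_merge_go _ _ _ _ _ _ _ _ _ hb hc2 (by simp),
            pvFinal_eq cnt c (a + e) acc hace,
            show max (pass1 cnt ((d, b) :: (c2, e) :: r4 :: rest') (max acc (min (a + 1) (cnt c)))) (min (a + e + 1) (cnt c)) = pass1 cnt ((d, b) :: (c2, e) :: r4 :: rest') (max (max acc (min (a + 1) (cnt c))) (min (a + e + 1) (cnt c))) from (pass1_max cnt _ _ _).symm,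
            max_assoc, max_eq_right hm1M]
          exact ih _ htl_len htl_cnt hacc'
      · have hm12 : min 2 (cnt c) ≤ max acc (min (a + 1) (cnt c)) ∨ True := Or.inr trivial
        rw [wins_nomerge _ _ _ _ _ _ _ _ _ hcond, pvFinal_eq cnt c a acc hac, if_neg hcond]
        have hacc' : ∀ e', sumLen e' ((d, b) :: (c2, e) :: rest) < cnt e' →
            min 2 (cnt e') ≤ max acc (min (a + 1) (cnt c)) := by
          intro e' hlt
          by_cases hce : c = e'
          · subst hce; omega
          · have h2 := hacc e'
            rw [hsum e'] at h2
            simp only [hce, if_false] at h2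
            have := htl_nn e'
            exact le_trans (h2 (by omega)) (le_max_left _ _)
        exact ih _ htl_len htl_cnt hacc'

theorem getD_drop' (t : List Char) (p k : Nat) : (t.drop p).getD k ' ' = t.getD (p + k) ' ' := by
  simp [List.getD_eq_getElem?_getD, List.getElem?_drop]

theorem drop_takeWhile_len (l : List Char) (p : Char → Bool) :
    l.drop (l.takeWhile p).length = l.dropWhile p := by
  have h : l.takeWhile p ++ l.dropWhile p = l := List.takeWhile_append_dropWhile
  calc l.drop (l.takeWhile p).length
      = (l.takeWhile p ++ l.dropWhile p).drop (l.takeWhile p).length := by rw [h]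
    _ = l.dropWhile p := List.drop_left

theorem getD_takeWhile (l : List Char) (p : Char → Bool) (k : Nat)
    (hk : k < (l.takeWhile p).length) : p (l.getD k ' ') = true := by
  have h : l.takeWhile p ++ l.dropWhile p = l := List.takeWhile_append_dropWhile
  have h1 : l.getD k ' ' = (l.takeWhile p).getD k ' ' := by
    calc l.getD k ' ' = ((l.takeWhile p ++ l.dropWhile p)).getD k ' ' := by rw [h]
      _ = (l.takeWhile p).getD k ' ' := List.getD_append _ _ _ _ hk
  rw [h1, List.getD_eq_getElem _ _ hk]
  exact List.mem_takeWhile_imp (List.getElem_mem hk)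

theorem drop_len_of_drop (t : List Char) (p : Nat) (c : Char) (r : List Char)
    (h : t.drop p = c :: r) : p < t.length ∧ t.length = p + 1 + r.length := by
  have h1 := congrArg List.length h
  simp [List.length_drop] at h1
  have h2 : p < t.length := by
    by_contra hh
    simp [List.drop_eq_nil_of_le (Nat.le_of_not_lt hh)] at h
  exact ⟨h2, by omega⟩

theorem getD_of_drop (t : List Char) (p : Nat) (c : Char) (r : List Char)
    (h : t.drop p = c :: r) : t.getD p ' ' = c := by
  have : (t.drop p).getD 0 ' ' = c := by rw [h]; rfl
  simpa [getD_drop'] using this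

theorem drop_succ_of_drop (t : List Char) (p : Nat) (c : Char) (r : List Char)
    (h : t.drop p = c :: r) : t.drop (p + 1) = r := by
  have : (t.drop p).drop 1 = t.drop (p + 1) := by rw [List.drop_drop]
  rw [← this, h]
  rfl

theorem runsOf_nil : runsOf [] = [] := by rw [runsOf]

theorem loopA_win (t : List Char) (cnt : Char → Int) :
    ∀ (N p j : Nat) (acc : Int) (c : Char) (rest : List Char)
      (hdrop : t.drop p = c :: rest) (hN : t.length - p ≤ N) (hj : j < p + 1),
      loopA t cnt (p + 1) j 0 c 1 acc hj = wins cnt (runsOf (c :: rest)) acc := by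
  intro N
  induction N with
  | zero =>
    intro p j acc c rest hdrop hN hj
    obtain ⟨hp, _⟩ := drop_len_of_drop t p c rest hdrop
    omega
  | succ N ihN =>
    intro p j acc c rest hdrop hN hj
    obtain ⟨hp, hlen⟩ := drop_len_of_drop t p c rest hdrop
    have hdrop1 : t.drop (p + 1) = rest := drop_succ_of_drop t p c rest hdrop
    set a0 := (rest.takeWhile (· == c)).length with ha0
    have ha0le : a0 ≤ rest.length := by
      rw [ha0]; exact (List.takeWhile_sublist _).length_le
    have hchars : ∀ k, k < a0 → t.getD (p + 1 + k) ' ' = c := by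
      intro k hk
      have h1 : t.getD (p + 1 + k) ' ' = rest.getD k ' ' := by
        rw [← getD_drop', hdrop1]
      rw [h1]
      have := getD_takeWhile rest (· == c) k hk
      simpa using this
    have hdw : t.drop (p + 1 + a0) = rest.dropWhile (· == c) := by
      have h1 : (t.drop (p + 1)).drop a0 = t.drop (p + 1 + a0) := by
        rw [List.drop_drop, Nat.add_comm]
      rw [← h1, hdrop1, ha0, drop_takeWhile_len]
    rw [loopA_consume t cnt c a0 (p + 1) j 0 1 acc hj (by omega) hchars]
    rw [runsOf]
    rw [← ha0]
    cases hdw2 : rest.dropWhile (· == c) with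
    | nil =>
      -- the only run; the loop runs off the end of the string
      rw [hdw2] at hdw
      have hend : p + 1 + a0 = t.length := by
        have := congrArg List.length hdw
        simp [List.length_drop] at this
        omega
      rw [loopA, dif_neg (by omega), runsOf_nil, wins_one,
        show (1:Int) + (a0:Int) = (a0:Int) + 1 from by ring]
    | cons d rest2 =>
      rw [hdw2] at hdw
      have hd : (d == c) = false := by
        have := List.head?_dropWhile_not (· == c) rest
        rw [hdw2] at this; simpa using this
      have hdne : ¬ (d = c) := by simpa using hd
      obtain ⟨hi0, hlen2⟩ := drop_len_of_drop t (p + 1 + a0) d rest2 hdw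
      have hgetd : t.getD (p + 1 + a0) ' ' = d := getD_of_drop _ _ _ _ hdw
      have hdrop2 : t.drop (p + 1 + a0 + 1) = rest2 := drop_succ_of_drop _ _ _ _ hdw
      rw [loopA, dif_pos hi0]
      simp only [hgetd, if_neg hdne, reduceIte]
      cases hrest2 : rest2 with
      | nil =>
        -- the final run has length 1 and is consumed as the skipped character
        rw [hrest2] at hdrop2 hlen2
        rw [loopA, dif_neg (by simp at hlen2; omega)]
        have : runsOf [d] = [(d, 1)] := by rw [runsOf]; simp [runsOf]
        rw [this, wins_two_skip _ _ _ _ _ _ rfl,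
          show (1:Int) + (a0:Int) = (a0:Int) + 1 from by ring]
      | cons e rest3 =>
        rw [hrest2] at hdrop2 hlen2
        have hgete : t.getD (p + 1 + a0 + 1) ' ' = e := getD_of_drop _ _ _ _ hdrop2
        obtain ⟨hi1, hlen3⟩ := drop_len_of_drop t (p + 1 + a0 + 1) e rest3 hdrop2
        have hdrop3 : t.drop (p + 1 + a0 + 1 + 1) = rest3 := drop_succ_of_drop _ _ _ _ hdrop2
        have hj0 : 0 < p + 1 + a0 := by omega
        have hNlt : t.length - (p + 1 + a0) ≤ N := by omega
        have hcd : (c == d) = false := by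
          simp only [beq_eq_false_iff_ne]
          exact fun h => hdne h.symm
        by_cases hec : e = c
        · -- a length-1 gap followed by another run of c : A merges the two runs
          subst hec
          set b1 := (rest3.takeWhile (· == e)).length with hb1
          have hb1le : b1 ≤ rest3.length := by
            rw [hb1]; exact (List.takeWhile_sublist _).length_le
          have hchars2 : ∀ k, k < 1 + b1 → t.getD (p + 1 + a0 + 1 + k) ' ' = e := by
            intro k hk
            cases k with
            | zero => simpa using hgete
            | succ k' =>
              have he1 : p + 1 + a0 + 1 + (k' + 1) = p + 1 + a0 + 1 + 1 + k' := by omega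
              rw [he1, ← getD_drop' t (p + 1 + a0 + 1 + 1) k', hdrop3]
              have := getD_takeWhile rest3 (· == e) k' (by omega)
              simpa using this
          rw [loopA_consume t cnt e (1 + b1) (p + 1 + a0 + 1) (p + 1 + a0) 1 (1 + (a0:Int)) acc
            (by omega) (by omega) hchars2]
          have hdw2d : t.drop (p + 1 + a0 + 1 + (1 + b1)) = rest3.dropWhile (· == e) := by
            have he2 : p + 1 + a0 + 1 + (1 + b1) = p + 1 + a0 + 1 + 1 + b1 := by omega
            rw [he2, ← List.drop_drop, hdrop3, hb1, drop_takeWhile_len]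
          have hr1 : runsOf (d :: e :: rest3)
              = (d, 1) :: (e, (b1:Int) + 1) :: runsOf (rest3.dropWhile (· == e)) := by
            rw [runsOf]
            simp only [List.takeWhile_cons, List.dropWhile_cons, hcd, Bool.false_eq_true,
              if_false, cond_false, List.length_nil]
            rw [runsOf]
            rw [← hb1]
            norm_num
          rw [hr1]
          cases hdw2c : rest3.dropWhile (· == e) with
          | nil =>
            rw [hdw2c] at hdw2d
            have hend2 : p + 1 + a0 + 1 + (1 + b1) = t.length := by
              have := congrArg List.length hdw2d
              simp [List.length_drop] at this
              omega
            rw [loopA, dif_neg (by omega), runsOf_nil, wins_merge_end _ _ _ _ _ _ _ _ rfl rfl,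
              show (1:Int) + (a0:Int) + ((1:Nat) + b1 : Nat) = (a0:Int) + 1 + ((b1:Int) + 1) from by push_cast; ring]
          | cons f rest4 =>
            rw [hdw2c] at hdw2d
            obtain ⟨hi2, hlen4⟩ := drop_len_of_drop t _ f rest4 hdw2d
            have hgetf : t.getD (p + 1 + a0 + 1 + (1 + b1)) ' ' = f := getD_of_drop _ _ _ _ hdw2d
            have hf : (f == e) = false := by
              have h1 := List.head?_dropWhile_not (· == e) rest3
              rw [hdw2c] at h1; simpa using h1
            have hfne : ¬ (f = e) := by simpa using hf
            rw [loopA, dif_pos hi2]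
            simp only [hgetf, if_neg hfne, reduceIte]
            rw [dif_pos hj0]
            simp only [hgetd]
            have hrunsne : runsOf (f :: rest4) ≠ [] := by rw [runsOf]; simp
            rw [ihN (p + 1 + a0) (p + 1 + a0) _ d (e :: rest3) (hrest2 ▸ hdw) hNlt (Nat.lt_succ_self _), hr1,
              wins_merge_go _ _ _ _ _ _ _ _ _ rfl rfl hrunsne,
              show (1:Int) + (a0:Int) + ((1:Nat) + b1 : Nat) = (a0:Int) + 1 + ((b1:Int) + 1) from by push_cast; ring,
              if_neg (Nat.one_ne_zero), hdw2c]
        · -- the gap is not bridgeable: A finalises this window and restarts at the gap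
          rw [loopA, dif_pos hi1]
          simp only [hgete, if_neg hec, reduceIte]
          rw [dif_pos hj0]
          simp only [hgetd]
          rw [ihN (p + 1 + a0) (p + 1 + a0) _ d (e :: rest3) (hrest2 ▸ hdw) hNlt (Nat.lt_succ_self _),
            if_neg (Nat.one_ne_zero),
            show (1:Int) + (a0:Int) = (a0:Int) + 1 from by ring]
          by_cases hed : e = d
          · subst hed
            have htw : (e :: rest3).takeWhile (· == e) = e :: rest3.takeWhile (· == e) := by
              simp [List.takeWhile_cons]
            have hre : runsOf (e :: e :: rest3)
                = (e, (((e :: rest3).takeWhile (· == e)).length : Int) + 1)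
                  :: runsOf ((e :: rest3).dropWhile (· == e)) := by
              rw [runsOf]
            have hbne : ((((e :: rest3).takeWhile (· == e)).length : Int) + 1) ≠ 1 := by
              rw [htw]
              simp only [List.length_cons]
              push_cast
              omega
            rw [hre]
            cases hXS : runsOf ((e :: rest3).dropWhile (· == e)) with
            | nil => rw [wins_two_go _ _ _ _ _ _ hbne, wins_one]
            | cons x xs =>
              obtain ⟨xc, xl⟩ := x
              rw [wins_nomerge _ _ _ _ _ _ _ _ _ (fun h => hbne h.1)]
          · have hed' : (e == d) = false := by simpa using hed
            have hre : runsOf (d :: e :: rest3) = (d, 1) :: runsOf (e :: rest3) := by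
              rw [runsOf]
              simp [List.takeWhile_cons, List.dropWhile_cons, hed']
            have hre2 : runsOf (e :: rest3)
                = (e, ((rest3.takeWhile (· == e)).length : Int) + 1)
                  :: runsOf (rest3.dropWhile (· == e)) := by
              rw [runsOf]
            rw [hre, hre2, wins_nomerge _ _ _ _ _ _ _ _ _ (fun h => hec h.2)]


theorem runsOf_len_pos : ∀ (t : List Char), ∀ r ∈ runsOf t, (1:Int) ≤ r.2 := by
  intro t
  induction t using runsOf.induct with
  | case1 => intro r hr; simp [runsOf_nil] at hr
  | case2 c rest ih =>
    intro r hr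
    rw [runsOf] at hr
    rcases List.mem_cons.mp hr with h | h
    · subst h; simp
    · exact ih r h

theorem count_takeWhile_eq (l : List Char) (c : Char) :
    (l.takeWhile (· == c)).count c = (l.takeWhile (· == c)).length := by
  rw [List.count_eq_length]
  intro b hb
  have := List.mem_takeWhile_imp hb
  simp at this
  simp [this]

theorem count_takeWhile_ne (l : List Char) (c e : Char) (h : e ≠ c) :
    (l.takeWhile (· == c)).count e = 0 := by
  rw [List.count_eq_zero]
  intro hmem
  have := List.mem_takeWhile_imp hmem
  simp at this
  exact h this

theorem sumLen_runsOf : ∀ (t : List Char) (e : Char), sumLen e (runsOf t) = (t.count e : Int) := by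
  intro t
  induction t using runsOf.induct with
  | case1 => intro e; simp [runsOf_nil, sumLen]
  | case2 c rest ih =>
    intro e
    rw [runsOf]
    have hsplit : rest.count e = (rest.takeWhile (· == c)).count e + (rest.dropWhile (· == c)).count e := by
      conv_lhs => rw [show rest = rest.takeWhile (· == c) ++ rest.dropWhile (· == c) from
        List.takeWhile_append_dropWhile.symm]
      rw [List.count_append]
    simp only [sumLen, ih]
    by_cases hce : c = e
    · subst hce
      rw [if_pos rfl, List.count_cons, hsplit, count_takeWhile_eq]
      push_cast
      simp
      try ring
    · rw [if_neg hce, List.count_cons, hsplit, count_takeWhile_ne _ _ _ (fun h => hce h.symm)]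
      have : (e == c) = false := by simpa using (fun h => hce h.symm)
      simp [hce]
theorem maxRepOpt1_agrees (text : String) (hpre : text ≠ "") :
    maxRepOpt1 text = maxRepOpt1_alt text := by
  have htne : text.toList ≠ [] := by
    intro h
    exact hpre (by rwa [← String.toList_eq_nil_iff])
  cases ht : text.toList with
  | nil => exact absurd ht htne
  | cons c rest =>
    unfold maxRepOpt1 maxRepOpt1_alt
    simp only [ht, reduceIte]
    have hget : PySem.List.pyGet? (c :: rest) 0 = some c := by
      simp [PySem.List.pyGet?, PySem.List.pyIdx?]
    rw [hget]
    simp only []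
    show loopA (c :: rest) (pvCnt (c :: rest)) 1 0 0 c 1 0 Nat.one_pos
      = if c :: rest = [] then 0
        else pass2 (pvCnt (c :: rest)) (runsOf (c :: rest)) (pass1 (pvCnt (c :: rest)) (runsOf (c :: rest)) 0)
    rw [if_neg (by simp)]
    have hwin := loopA_win (c :: rest) (pvCnt (c :: rest)) (c :: rest).length 0 0 0 c rest
      rfl (by omega) (by omega)
    rw [hwin]
    apply wins_eq_pass
    · exact runsOf_len_pos _
    · intro e
      rw [sumLen_runsOf]
      simp [pvCnt]
    · intro e h
      rw [sumLen_runsOf] at h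
      simp [pvCnt] at h

-- ===== VERDICT (by name: the statement is the Claim_ definition above) =====
theorem maxRepOpt1_spec : Claim_equal_maxRepOpt1 := by
  intro text _ hpre
  unfold Spec_maxRepOpt1
  exact maxRepOpt1_agrees text hpre
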